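-- pv_equiv track=rewrite | github.com/blzzua/codewars | 6-kyu/n_centered_array.py | is_centered
-- ===== SOURCE A (Python) =====
-- def is_centered(arr,n):
--     if (n == 0 and len(arr) % 2 == 0): return True # wierd zero-len cetral subseq workaround
--     if sum(arr) == n: return True  # wierd zero-len edge subseq workaround
--
--     while len(arr) > 1:
--         arr.pop(0), arr.pop()
--         if sum(arr) == n:
--             return True
--     return False
-- ===== SOURCE B (Python) =====
-- def is_centered(arr, n):
--     if n == 0 and len(arr) % 2 == 0:
--         return True
--     s = sum(arr)
--     left, right = 0, len(arr) - 1
--     while s != n: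
--         if left >= right:
--             return False
--         s -= arr[left] + arr[right]
--         left += 1
--         right -= 1
--     return True
-- ===== Notes on version B (the rewrite author's own statement) =====
-- stated objective: faster
-- what changed: Instead of popping both ends and re-summing the whole remaining list at every step, B computes the total once and walks two indices inward, subtracting the outer pair from a running sum.
import Mathlib
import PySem

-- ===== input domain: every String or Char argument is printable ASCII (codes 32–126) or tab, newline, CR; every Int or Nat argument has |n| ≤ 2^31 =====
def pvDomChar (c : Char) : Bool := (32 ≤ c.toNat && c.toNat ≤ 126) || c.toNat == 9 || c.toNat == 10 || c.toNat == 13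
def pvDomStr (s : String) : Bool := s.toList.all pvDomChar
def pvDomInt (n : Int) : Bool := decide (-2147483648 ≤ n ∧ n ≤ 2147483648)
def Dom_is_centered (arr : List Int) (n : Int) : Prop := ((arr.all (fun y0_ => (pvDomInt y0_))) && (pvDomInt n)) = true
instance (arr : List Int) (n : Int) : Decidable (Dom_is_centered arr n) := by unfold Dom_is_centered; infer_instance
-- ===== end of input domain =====

-- B replaces A's repeated pop-both-ends-and-resum loop with one pass keeping a running sum and two
-- indices; same return value everywhere. Note: Python A mutates its argument `arr` in place
-- (pops both ends); B does not — the equivalence proved here is about the return value only.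

-- ===== PORT A =====
-- A's while loop: pop first and last, then test the sum of what remains
def isCenteredLoopA (arr : List Int) (n : Int) : Bool :=
  if arr.length > 1 then
    let arr' := (arr.drop 1).dropLast
    if arr'.sum == n then true else isCenteredLoopA arr' n
  else false
termination_by arr.length
decreasing_by simp_all; omega

def is_centered (arr : List Int) (n : Int) : Bool :=
  if n == 0 && arr.length % 2 == 0 then true
  else if arr.sum == n then true
  else isCenteredLoopA arr n

-- ===== PORT B =====
-- B's while loop: running sum s over the window arr[left..right]
-- (the reads arr[left], arr[right] are always in range when reached: 0 ≤ left < right < len arr)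
def isCenteredLoopB (arr : List Int) (n : Int) (s : Int) (left right : Int) : Bool :=
  if s == n then true
  else if left ≥ right then false
  else isCenteredLoopB arr n
        (s - ((PySem.List.pyGet? arr left).getD 0 + (PySem.List.pyGet? arr right).getD 0))
        (left + 1) (right - 1)
termination_by (right - left).toNat
decreasing_by omega

def is_centered_alt (arr : List Int) (n : Int) : Bool :=
  if n == 0 && arr.length % 2 == 0 then true
  else isCenteredLoopB arr n arr.sum 0 (arr.length - 1)

-- ===== PRECONDITION & SPEC =====
def Spec_is_centered (arr : List Int) (n : Int) (out : Bool) : Prop := out = is_centered_alt arr n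
instance (arr : List Int) (n : Int) (out : Bool) : Decidable (Spec_is_centered arr n out) := by unfold Spec_is_centered; infer_instance

-- ===== CLAIM (what is proved, stated in full; the proofs are below) =====
def Claim_equal_is_centered : Prop := ∀ (arr : List Int) (n : Int), Dom_is_centered arr n → Spec_is_centered arr n (is_centered arr n)

-- ===== LEMMAS AND PROOFS =====

-- reference loop: shrink the window list itself, testing the sum first (B's test order)
def gLoop (w : List Int) (n : Int) : Bool :=
  if w.sum == n then true
  else if w.length ≤ 1 then false
  else gLoop ((w.drop 1).dropLast) n
termination_by w.length
decreasing_by simp_all; omega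

-- A's loop equals the reference loop, modulo the leading sum test
lemma gLoop_eq_A (w : List Int) (n : Int) :
    gLoop w n = (decide (w.sum = n) || isCenteredLoopA w n) := by
  induction w using gLoop.induct (n := n) with
  | case1 w hs =>
    unfold gLoop isCenteredLoopA
    by_cases hl : w.length > 1 <;> simp_all
  | case2 w hs hl =>
    unfold gLoop isCenteredLoopA
    simp_all
  | case3 w hs hl ih =>
    unfold gLoop isCenteredLoopA
    simp_all

-- sum of a list with ≥ 2 elements = first + middle + last
lemma sum_cons_ends (a : Int) (w' : List Int) (hne : w' ≠ []) :
    (a :: w').sum = a + (w'.dropLast).sum + w'.getLast hne := by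
  conv_lhs => rw [← List.dropLast_concat_getLast hne]
  simp; ring

-- the middle of a window of arr is the next (two-smaller) window
lemma mid_window (arr : List Int) (L k : Nat) (h2 : 2 ≤ k) (hlen : L + k ≤ arr.length) :
    (((arr.drop L).take k).drop 1).dropLast = (arr.drop (L+1)).take (k-2) := by
  rw [List.drop_take, List.drop_drop, List.dropLast_eq_take, List.take_take]
  congr 1
  simp [List.length_take, List.length_drop]
  omega

-- B's loop, started on the window arr[left .. left+k-1] with its sum, equals the reference loop
lemma loopB_eq_g (k : Nat) (arr : List Int) (n : Int) (left : Int)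
    (hl : 0 ≤ left) (hlen : left.toNat + k ≤ arr.length) :
    isCenteredLoopB arr n ((arr.drop left.toNat).take k).sum left (left + k - 1)
      = gLoop ((arr.drop left.toNat).take k) n := by
  induction k using Nat.strong_induction_on generalizing left with
  | _ k IH =>
  set w := (arr.drop left.toNat).take k with hw
  have hwlen : w.length = k := by simp [hw]; omega
  unfold isCenteredLoopB gLoop
  by_cases hs : w.sum = n
  · simp [hs]
  · by_cases hk : k ≤ 1
    · have hge : left ≥ left + k - 1 := by omega
      simp [hs, hge, hwlen, hk]
    · have hge : ¬ left ≥ left + k - 1 := by omega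
      have hLlt : left.toNat < arr.length := by omega
      -- the two end reads
      have hget0 : (PySem.List.pyGet? arr left).getD 0 = w[0]'(by omega) := by
        rw [PySem.List.pyGet?_eq_some_getElem arr hl (by omega)]
        simp [hw, List.getElem_take, List.getElem_drop]
      have hrt : (left + k - 1).toNat = left.toNat + (k - 1) := by omega
      have hget1 : (PySem.List.pyGet? arr (left + k - 1)).getD 0 = w[k-1]'(by omega) := by
        rw [PySem.List.pyGet?_eq_some_getElem arr (by omega) (by omega)]
        simp [hrt, hw, List.getElem_take, List.getElem_drop]
      -- decompose w into first element, middle, last element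
      have hwne : w ≠ [] := by intro h; rw [h] at hwlen; simp at hwlen; omega
      obtain ⟨a, w', hww⟩ := List.exists_cons_of_ne_nil hwne
      have hne : w' ≠ [] := by
        intro h; rw [hww, h] at hwlen; simp at hwlen; omega
      have hsum : w.sum - (w[0]'(by omega) + w[k-1]'(by omega)) = ((w.drop 1).dropLast).sum := by
        have h0 : w[0]'(by omega) = a := by simp [hww]
        have hk1 : w[k-1]'(by omega) = w'.getLast hne := by
          have : k - 1 = w'.length - 1 + 1 := by
            rw [hww] at hwlen; simp at hwlen; omega
          simp [hww, this, List.getLast_eq_getElem]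
        rw [h0, hk1, hww, sum_cons_ends a w' hne]
        simp
      have hmid : (w.drop 1).dropLast = (arr.drop (left.toNat + 1)).take (k-2) := by
        rw [hw]; exact mid_window arr left.toNat k (by omega) hlen
      have hIH := IH (k-2) (by omega) (left + 1) (by omega) (by omega)
      have hcast : ((k - 2 : Nat) : Int) = (k : Int) - 2 := by omega
      have htn : (left + 1).toNat = left.toNat + 1 := by omega
      rw [hcast, htn] at hIH
      have harg : left + 1 + ((k : Int) - 2) - 1 = left + ↑k - 1 - 1 := by ring
      rw [harg] at hIH
      rw [if_neg (show ¬ ((w.sum == n) = true) by simpa using hs), if_neg hge,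
          if_neg (show ¬ w.length ≤ 1 by omega), hget0, hget1, hsum, hmid]
      rw [hIH]
      simp [hs]

-- ===== VERDICT (by name: the statement is the Claim_ definition above) =====
theorem is_centered_spec : Claim_equal_is_centered := by
  intro arr n _
  unfold Spec_is_centered is_centered is_centered_alt
  by_cases h0 : (n == 0 && arr.length % 2 == 0) = true
  · simp [h0]
  · simp only [h0, if_false]
    have := loopB_eq_g arr.length arr n 0 le_rfl (by simp)
    simp only [Int.toNat_zero, List.drop_zero, List.take_length, zero_add] at this
    rw [this, gLoop_eq_A]
    by_cases hs : arr.sum = n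
    · simp [hs]
    · simp [hs]
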